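-- pv_equiv track=rewrite | github.com/kaushik654/cnc-machine | transform_to_sft (1).py | find_matching_skill
-- ===== SOURCE A (Python) =====
-- def find_matching_skill(target_tools, skill_index):
--     """
--     Returns the name of the skill whose requires_tools is a superset of
--     target_tools, or None if no skill matches.
--
--     Preference: smallest skill that covers target_tools (most specific).
--     """
--     target_set = set(target_tools)
--     candidates = []
--     for name, info in skill_index.items():
--         required = set(info.get("requires_tools", []))
--         if target_set.issubset(required) and required:
--             candidates.append((name, len(required)))
--     if not candidates:
--         return None
--     # Smallest required-tools list wins (most specific skill)
--     candidates.sort(key=lambda x: x[1])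
--     return candidates[0][0]
-- ===== SOURCE B (Python) =====
-- def find_matching_skill(target_tools, skill_index):
--     """Single pass: keep the first skill with the smallest nonempty requires_tools
--     set covering target_tools; no candidates list, no sort."""
--     target_set = set(target_tools)
--     best_name = None
--     best_size = 0
--     for name, info in skill_index.items():
--         required = set(info.get("requires_tools", []))
--         if required and target_set.issubset(required) and (best_name is None or len(required) < best_size):
--             best_name = name
--             best_size = len(required)
--     return best_name
-- ===== Notes on version B (the rewrite author's own statement) =====
-- stated objective: simpler
-- what changed: Replaced the collect-candidates-then-stable-sort-and-take-head structure with a single pass that keeps the first skill whose nonempty required-tool set covers the target and is strictly smaller than the best seen so far.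
import Mathlib
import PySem

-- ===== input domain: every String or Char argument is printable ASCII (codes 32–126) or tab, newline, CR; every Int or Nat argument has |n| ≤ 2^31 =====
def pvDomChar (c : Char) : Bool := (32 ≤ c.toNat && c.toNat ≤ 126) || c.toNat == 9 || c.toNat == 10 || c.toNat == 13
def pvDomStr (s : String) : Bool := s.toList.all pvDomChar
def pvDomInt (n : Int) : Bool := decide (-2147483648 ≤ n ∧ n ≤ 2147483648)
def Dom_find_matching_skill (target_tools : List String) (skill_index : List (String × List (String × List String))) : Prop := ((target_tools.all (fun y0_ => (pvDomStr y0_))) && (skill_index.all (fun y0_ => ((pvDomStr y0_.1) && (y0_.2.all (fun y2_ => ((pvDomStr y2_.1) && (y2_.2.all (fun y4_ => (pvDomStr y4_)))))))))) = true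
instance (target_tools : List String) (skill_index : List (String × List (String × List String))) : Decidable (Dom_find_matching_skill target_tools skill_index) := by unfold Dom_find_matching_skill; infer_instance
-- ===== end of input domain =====

-- B replaces A's collect-then-stable-sort selection by a single pass keeping the
-- first strictly-smallest covering skill (objective: simpler).

-- ===== PORT A =====
def find_matching_skill (target_tools : List String) (skill_index : List (String × List (String × List String))) : Option String :=
  let target_set := PySem.Set.ofList target_tools
  let candidates : List (String × Int) := skill_index.foldl (fun acc p =>
    let required := PySem.Set.ofList (PySem.Dict.getD (PySem.Dict.mk p.2) "requires_tools" [])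
    if PySem.Set.issubset target_set required && !required.isEmpty then
      acc ++ [(p.1, PySem.Set.len required)]
    else acc) []
  if candidates.isEmpty then none
  else
    match PySem.List.pyGet? (PySem.List.sorted candidates (fun x => x.2)) 0 with
    | some c => some c.1
    | none => none

-- ===== PORT B =====
def find_matching_skill_alt (target_tools : List String) (skill_index : List (String × List (String × List String))) : Option String :=
  let target_set := PySem.Set.ofList target_tools
  let best : Option (String × Int) := skill_index.foldl (fun best p =>
    let required := PySem.Set.ofList (PySem.Dict.getD (PySem.Dict.mk p.2) "requires_tools" [])
    if !required.isEmpty && PySem.Set.issubset target_set required &&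
        (match best with | none => true | some b => decide (PySem.Set.len required < b.2)) then
      some (p.1, PySem.Set.len required)
    else best) none
  best.map Prod.fst

-- ===== PRECONDITION & SPEC =====
def Spec_find_matching_skill (target_tools : List String) (skill_index : List (String × List (String × List String))) (out : Option String) : Prop := out = find_matching_skill_alt target_tools skill_index
instance (target_tools : List String) (skill_index : List (String × List (String × List String))) (out : Option String) : Decidable (Spec_find_matching_skill target_tools skill_index out) := by unfold Spec_find_matching_skill; infer_instance

-- ===== CLAIM (what is proved, stated in full; the proofs are below) =====
def Claim_equal_find_matching_skill : Prop := ∀ (target_tools : List String) (skill_index : List (String × List (String × List String))), Dom_find_matching_skill target_tools skill_index → Spec_find_matching_skill target_tools skill_index (find_matching_skill target_tools skill_index)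

-- ===== LEMMAS AND PROOFS =====

-- head of Python's stable sort = first element with strictly minimal key
theorem head?_sorted_eq_min? {α κ : Type} [LinearOrder κ] (xs : List α) (key : α → κ) :
    (PySem.List.sorted xs key).head? = PySem.List.min? xs key := by
  rw [PySem.List.sorted_eq_foldl_insertBy]
  unfold PySem.List.min?
  induction xs using List.reverseRecOn with
  | nil => rfl
  | append_singleton xs x ih =>
    rw [List.foldl_append, List.foldl_append]
    simp only [List.foldl_cons, List.foldl_nil]
    rw [← ih]
    cases h : List.foldl (fun acc x => PySem.List.insertBy (fun a b => decide (key a < key b)) x acc) [] xs with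
    | nil => rfl
    | cons m t =>
      simp only [PySem.List.insertBy, List.head?_cons]
      by_cases hlt : key x < key m
      · simp [hlt]
      · simp [hlt]

theorem find_matching_skill_equiv (target_tools : List String) (skill_index : List (String × List (String × List String))) :
    find_matching_skill target_tools skill_index = find_matching_skill_alt target_tools skill_index := by
  unfold find_matching_skill find_matching_skill_alt
  simp only []
  set ts := PySem.Set.ofList target_tools with hts
  set cond : (String × List (String × List String)) → Bool := fun p =>
    PySem.Set.issubset ts (PySem.Set.ofList (PySem.Dict.getD (PySem.Dict.mk p.2) "requires_tools" [])) &&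
      !(PySem.Set.ofList (PySem.Dict.getD (PySem.Dict.mk p.2) "requires_tools" [])).isEmpty with hcond
  set f : (String × List (String × List String)) → String × Int := fun p =>
    (p.1, PySem.Set.len (PySem.Set.ofList (PySem.Dict.getD (PySem.Dict.mk p.2) "requires_tools" []))) with hf
  -- A's candidates list is the filtered+mapped skill list
  have hA : (skill_index.foldl (fun acc p =>
      if cond p then acc ++ [f p] else acc) ([] : List (String × Int)))
      = ((skill_index.filter cond).map f) := by
    simpa using PySem.List.foldl_append_if cond f skill_index []
  -- B's fold is min? over the same candidates list
  have hB : (skill_index.foldl (fun best p =>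
      if !(PySem.Set.ofList (PySem.Dict.getD (PySem.Dict.mk p.2) "requires_tools" [])).isEmpty &&
          PySem.Set.issubset ts (PySem.Set.ofList (PySem.Dict.getD (PySem.Dict.mk p.2) "requires_tools" [])) &&
          (match best with | none => true | some b => decide (PySem.Set.len (PySem.Set.ofList (PySem.Dict.getD (PySem.Dict.mk p.2) "requires_tools" [])) < b.2)) then
        some (f p) else best) (none : Option (String × Int)))
      = PySem.List.min? ((skill_index.filter cond).map f) (fun x => x.2) := by
    unfold PySem.List.min?
    rw [List.foldl_map, List.foldl_filter]
    apply PySem.List.foldl_congr_mem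
    intro best p _
    by_cases hc : cond p
    · have h1 : PySem.Set.issubset ts (PySem.Set.ofList (PySem.Dict.getD (PySem.Dict.mk p.2) "requires_tools" [])) = true := by
        rw [hcond] at hc; exact (by simpa using hc : _ ∧ _).1
      have h2 : (!(PySem.Set.ofList (PySem.Dict.getD (PySem.Dict.mk p.2) "requires_tools" [])).isEmpty) = true := by
        rw [hcond] at hc; exact (by simpa using hc : _ ∧ _).2
      simp only [hc, h1, h2, Bool.true_and, if_true]
      cases best with
      | none => simp
      | some b => simp [hf]
    · have : (PySem.Set.issubset ts (PySem.Set.ofList (PySem.Dict.getD (PySem.Dict.mk p.2) "requires_tools" [])) &&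
          !(PySem.Set.ofList (PySem.Dict.getD (PySem.Dict.mk p.2) "requires_tools" [])).isEmpty) = false := by
        rw [hcond] at hc; simpa using hc
      rcases Bool.and_eq_false_iff.mp this with h | h
      · simp [hc, h]
      · simp [hc, h]
  rw [hA, hB]
  set cs := ((skill_index.filter cond).map f) with hcs
  by_cases hnil : cs = []
  · simp [hnil, PySem.List.min?]
  · have h1 : cs.isEmpty = false := by simpa [List.isEmpty_iff] using hnil
    rw [h1]
    simp only [Bool.false_eq_true, if_false]
    have hhead : (PySem.List.sorted cs (fun x => x.2)).head? = PySem.List.min? cs (fun x => x.2) :=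
      head?_sorted_eq_min? cs (fun x => x.2)
    have hget : PySem.List.pyGet? (PySem.List.sorted cs (fun x => x.2)) 0
        = (PySem.List.sorted cs (fun x => x.2)).head? := by
      cases hs : PySem.List.sorted cs (fun x => x.2) with
      | nil =>
        exact absurd ((PySem.List.sorted_eq_nil_iff cs (fun x => x.2) false).mp hs) hnil
      | cons m t => simp [PySem.List.pyGet?, PySem.List.pyIdx?]
    rw [hget, hhead]
    cases hm : PySem.List.min? cs (fun x => x.2) with
    | none => exact absurd ((PySem.List.min?_eq_none_iff cs (fun x => x.2)).mp hm) hnil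
    | some c => rfl

-- ===== VERDICT (by name: the statement is the Claim_ definition above) =====
theorem find_matching_skill_spec : Claim_equal_find_matching_skill := by
  intro target_tools skill_index _
  unfold Spec_find_matching_skill
  exact find_matching_skill_equiv target_tools skill_index
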